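-- pv_equiv track=rewrite | github.com/tensorflow/autograph | reference_tests/nested_control_flow_test.py | while_break_in_try
-- ===== SOURCE A (Python) =====
-- def while_break_in_try(x):
--   z = 0
--   while x > 0:
--     x = x - 1
--     try:
--       if x < 5:
--         break
--       z = z + 1
--     finally:
--       z = z + 10
--   return z
-- ===== SOURCE B (Python) =====
-- def while_break_in_try(x):
--     # Closed form: each full iteration (x stays >= 6 before decrement) adds 11,
--     # the breaking iteration (reached whenever x > 0) adds 10.
--     if x <= 0:
--         return 0
--     if x <= 5:
--         return 10
--     return 11 * (x - 5) + 10
-- ===== Notes on version B (the rewrite author's own statement) =====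
-- stated objective: faster
-- what changed: Replaced the decrement-and-accumulate while loop by a closed-form piecewise formula in the initial x.
import Mathlib
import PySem

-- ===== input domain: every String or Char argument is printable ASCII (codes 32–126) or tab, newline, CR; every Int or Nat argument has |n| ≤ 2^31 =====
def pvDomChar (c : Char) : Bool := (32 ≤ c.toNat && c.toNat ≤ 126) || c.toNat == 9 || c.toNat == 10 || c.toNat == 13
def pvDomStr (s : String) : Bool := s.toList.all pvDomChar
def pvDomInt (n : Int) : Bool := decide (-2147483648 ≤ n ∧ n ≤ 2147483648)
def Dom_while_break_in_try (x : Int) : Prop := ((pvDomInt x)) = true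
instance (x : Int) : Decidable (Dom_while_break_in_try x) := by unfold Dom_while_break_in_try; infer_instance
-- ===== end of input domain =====

-- B replaces A's decrementing while loop by a closed-form piecewise formula (faster: O(1) vs O(x)).

-- ===== PORT A =====
-- the while loop of A: state (x, z); each iteration decrements x, then either
-- breaks adding 10 (the finally clause) or adds 1 + 10 and continues
def pvLoopA (x z : Int) : Int :=
  if _h : x > 0 then
    if x - 1 < 5 then z + 10
    else pvLoopA (x - 1) (z + 1 + 10)
  else z
termination_by x.toNat
decreasing_by omega

def while_break_in_try (x : Int) : Int := pvLoopA x 0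

-- ===== PORT B =====
def while_break_in_try_alt (x : Int) : Int :=
  if x ≤ 0 then 0
  else if x ≤ 5 then 10
  else 11 * (x - 5) + 10

-- ===== PRECONDITION & SPEC =====
def Spec_while_break_in_try (x : Int) (out : Int) : Prop := out = while_break_in_try_alt x
instance (x : Int) (out : Int) : Decidable (Spec_while_break_in_try x out) := by unfold Spec_while_break_in_try; infer_instance

-- ===== CLAIM (what is proved, stated in full; the proofs are below) =====
def Claim_equal_while_break_in_try : Prop := ∀ (x : Int), Dom_while_break_in_try x → Spec_while_break_in_try x (while_break_in_try x)

-- ===== LEMMAS AND PROOFS =====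
theorem pvLoopA_closed (x z : Int) :
    pvLoopA x z = z + (if x ≤ 0 then 0 else if x ≤ 5 then 10 else 11 * (x - 5) + 10) := by
  induction x, z using pvLoopA.induct with
  | case1 x z hx hbrk =>
      rw [pvLoopA]
      simp only [hx, dite_true, if_pos hbrk]
      have h1 : ¬ x ≤ 0 := by omega
      have h2 : x ≤ 5 := by omega
      simp [h1, h2]
  | case2 x z hx hbrk ih =>
      rw [pvLoopA]
      simp only [hx, dite_true, if_neg hbrk]
      rw [ih]
      have h1 : ¬ x ≤ 0 := by omega
      have h2 : ¬ x ≤ 5 := by omega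
      by_cases h3 : x - 1 ≤ 5
      · have h4 : ¬ x - 1 ≤ 0 := by omega
        simp [h1, h2, h3, h4]; omega
      · have h4 : ¬ x - 1 ≤ 0 := by omega
        simp [h1, h2, h3, h4]; ring
  | case3 x z hx =>
      rw [pvLoopA]
      have h1 : x ≤ 0 := by omega
      simp [hx, h1]

-- ===== VERDICT (by name: the statement is the Claim_ definition above) =====
theorem while_break_in_try_spec : Claim_equal_while_break_in_try := by
  intro x _
  unfold Spec_while_break_in_try while_break_in_try while_break_in_try_alt
  rw [pvLoopA_closed]
  split_ifs <;> omega
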